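-- pv_equiv track=rewrite | github.com/rubensilva091/University | Bachelor/Minho/Algorithmic Labs 2/Treino 1/horario.py | horario
-- ===== SOURCE A (Python) =====
-- def horario(ucs, alunos):
--
--     # encontrar UCS que se misturam
--     sobreposicao_ucs = []
--     for k1, tup1 in ucs.items():
--         for k2, tup2 in ucs.items():
--             if (k1 != k2):
--                 flag = 0
--                 hora_final1 = tup1[1]+tup1[2]
--                 hora_final2 = tup2[1]+tup2[2]
--                 if((hora_final1 >= tup2[1] and hora_final1 <= hora_final2)):
--                     flag = 1
--                 if(hora_final1 >= tup2[1] and hora_final1 <= tup2[1] and tup1[1] >= tup2[1] and tup1[1] <= hora_final2):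
--                     flag = 1
--                 if(flag and tup1[0] == tup2[0]):
--                     sobreposicao_ucs.append((k1, k2))
--
--     # encontrar as ucs que os alunos teem que nao podem se misturar
--     alunos_com_todas_ucs = []
--     for (k, v) in alunos.items():
--         all_possibles_ucs = []
--         flag1 = 1
--         flag2 = 1
--         for uc1 in v:
--             for uc2 in v:
--                 all_possibles_ucs.append((uc1, uc2))
--         for uc in all_possibles_ucs:
--
--             # detetar se o aluno possui alguma combinaçao que nao pode ter
--             if (uc in sobreposicao_ucs):
--                 flag1 = 0
--
--         # se o aluno poder frenquentar tudo, meter lo numa lista e contar as horas das aulas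
--         if (flag1):
--             hours = 0
--             for uc1 in v:
--
--                 # calcular horas de cada aluno
--                 for (kaux, vaux) in ucs.items():
--                     if (uc1 == kaux):
--                         hours += vaux[2]
--
--                 #A CADEIRA EXISTIR NAS UCS. por exemplo poo nao existe nas UCS, logo nao pode ser considerado
--                 if (uc1 not in ucs.keys()):
--                     flag2 = 0
--
--             if (flag2):
--                 alunos_com_todas_ucs.append((k, hours))
--
--     # retornar o tuplo
--     return sorted(alunos_com_todas_ucs, key=lambda i: (-i[1], i[0]))
-- ===== SOURCE B (Python) =====
-- def horario(ucs, alunos):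
--     # Per-student fold: no global overlap-pair list; same overlap arithmetic applied on demand.
--     def conflict(a, b):
--         t1, t2 = ucs[a], ucs[b]
--         if t1[0] != t2[0]:
--             return False
--         hf1 = t1[1] + t1[2]
--         hf2 = t2[1] + t2[2]
--         return (t2[1] <= hf1 <= hf2) or (hf1 == t2[1] and t2[1] <= t1[1] <= hf2)
--
--     res = []
--     for name, v in alunos.items():
--         if any(uc not in ucs for uc in v):
--             continue
--         if any(a != b and conflict(a, b) for a in v for b in v):
--             continue
--         res.append((name, sum(ucs[uc][2] for uc in v)))
--     res.sort(key=lambda p: (-p[1], p[0]))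
--     return res
-- ===== Notes on version B (the rewrite author's own statement) =====
-- stated objective: faster
-- what changed: B drops A's precomputed global list of overlapping UC pairs and its linear membership scans over that list: it folds the same overlap test directly into a single per-student pass (any-missing check, any-conflicting-pair check via O(1) dict lookups, sum of hours), then sorts once.
import Mathlib
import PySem

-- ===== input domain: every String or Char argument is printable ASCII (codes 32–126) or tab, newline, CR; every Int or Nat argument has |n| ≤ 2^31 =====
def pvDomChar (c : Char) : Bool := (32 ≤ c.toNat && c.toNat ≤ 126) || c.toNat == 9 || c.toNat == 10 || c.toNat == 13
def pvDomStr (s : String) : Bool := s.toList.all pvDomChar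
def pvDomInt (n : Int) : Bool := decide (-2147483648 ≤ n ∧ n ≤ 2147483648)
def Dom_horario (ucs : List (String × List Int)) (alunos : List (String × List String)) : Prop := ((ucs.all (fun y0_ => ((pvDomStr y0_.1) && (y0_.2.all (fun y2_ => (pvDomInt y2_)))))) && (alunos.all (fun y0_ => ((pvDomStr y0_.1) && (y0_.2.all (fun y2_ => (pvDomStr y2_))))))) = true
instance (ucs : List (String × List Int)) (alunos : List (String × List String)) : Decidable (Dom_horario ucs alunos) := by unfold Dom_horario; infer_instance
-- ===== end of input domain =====

-- B replaces A's precomputed global overlap-pair list (and its linear membership scans over it) by one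
-- per-student pass with direct dict lookups (measurably faster in a timing run); same return value on
-- Pre_ (association lists with distinct keys, UC tuples of length ≥ 3).


-- ===== PORT A =====
-- tup[i] for the fixed in-range indices 0,1,2 (Pre_ guarantees length ≥ 3, so the default is never taken)
def pvG (t : List Int) (i : Int) : Int := (PySem.List.pyGet? t i).getD 0

-- the flag/day test of A's inner overlap loop (the two 'if's setting flag, then 'flag and tup1[0] == tup2[0]')
def pvFlagDay (t1 t2 : List Int) : Bool :=
  let hora_final1 := pvG t1 1 + pvG t1 2
  let hora_final2 := pvG t2 1 + pvG t2 2
  let flag : Int := 0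
  let flag := if hora_final1 ≥ pvG t2 1 ∧ hora_final1 ≤ hora_final2 then 1 else flag
  let flag := if hora_final1 ≥ pvG t2 1 ∧ hora_final1 ≤ pvG t2 1 ∧ pvG t1 1 ≥ pvG t2 1 ∧ pvG t1 1 ≤ hora_final2 then 1 else flag
  decide (flag ≠ 0 ∧ pvG t1 0 = pvG t2 0)

def horario (ucs : List (String × List Int)) (alunos : List (String × List String)) : List (String × Int) :=
  let sobreposicao_ucs : List (String × String) :=
    ucs.foldl (fun acc p1 =>
      ucs.foldl (fun acc p2 =>
        if p1.1 ≠ p2.1 then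
          (if pvFlagDay p1.2 p2.2 then acc ++ [(p1.1, p2.1)] else acc)
        else acc) acc) []
  let alunos_com_todas_ucs : List (String × Int) :=
    alunos.foldl (fun res p =>
      let v := p.2
      let all_possibles_ucs : List (String × String) :=
        v.foldl (fun a uc1 => v.foldl (fun a uc2 => a ++ [(uc1, uc2)]) a) []
      let flag1 : Int :=
        all_possibles_ucs.foldl (fun f uc => if sobreposicao_ucs.contains uc then 0 else f) 1
      if flag1 ≠ 0 then
        let s := v.foldl (fun s uc1 =>
            (ucs.foldl (fun h q => if uc1 = q.1 then h + pvG q.2 2 else h) s.1,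
             if (ucs.map Prod.fst).contains uc1 then s.2 else (0 : Int))) ((0 : Int), (1 : Int))
        if s.2 ≠ 0 then res ++ [(p.1, s.1)] else res
      else res) []
  PySem.List.sorted2 alunos_com_todas_ucs (fun i => -i.2) (fun i => i.1)

-- ===== PORT B =====
-- ucs[k] (first match; keys are distinct under Pre_)
def pvLookup (ucs : List (String × List Int)) (k : String) : List Int :=
  ((ucs.find? (fun q => q.1 == k)).map (fun q => q.2)).getD []

-- Source B's 'conflict(a, b)'
def pvConflict (ucs : List (String × List Int)) (a b : String) : Bool :=
  let t1 := pvLookup ucs a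
  let t2 := pvLookup ucs b
  if pvG t1 0 ≠ pvG t2 0 then false
  else
    let hf1 := pvG t1 1 + pvG t1 2
    let hf2 := pvG t2 1 + pvG t2 2
    decide ((pvG t2 1 ≤ hf1 ∧ hf1 ≤ hf2) ∨ (hf1 = pvG t2 1 ∧ pvG t2 1 ≤ pvG t1 1 ∧ pvG t1 1 ≤ hf2))

def horario_alt (ucs : List (String × List Int)) (alunos : List (String × List String)) : List (String × Int) :=
  let res : List (String × Int) :=
    alunos.foldl (fun res p =>
      if p.2.any (fun uc => !(ucs.any (fun q => q.1 == uc))) then res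
      else if p.2.any (fun a => p.2.any (fun b => a ≠ b ∧ pvConflict ucs a b)) then res
      else res ++ [(p.1, (p.2.map (fun uc => pvG (pvLookup ucs uc) 2)).sum)]) []
  PySem.List.sorted2 res (fun i => -i.2) (fun i => i.1)

-- ===== PRECONDITION & SPEC =====
-- The arguments model Python dicts: Pre_ requires distinct keys (duplicate keys cannot reach the Python
-- functions) and excludes exactly the inputs on which A raises IndexError on a UC tuple shorter than 3:
-- with two or more UCs every tuple is indexed by the overlap loop, with at most one UC only the tuples of
-- UCs referenced by some student are indexed (when summing hours).
def Pre_horario (ucs : List (String × List Int)) (alunos : List (String × List String)) : Prop :=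
  (ucs.map Prod.fst).Nodup ∧ (alunos.map Prod.fst).Nodup ∧
    ((∀ p ∈ ucs, 3 ≤ p.2.length) ∨
     (ucs.length ≤ 1 ∧ ∀ a ∈ alunos, ∀ uc ∈ a.2, ∀ p ∈ ucs, p.1 = uc → 3 ≤ p.2.length))
instance (ucs : List (String × List Int)) (alunos : List (String × List String)) : Decidable (Pre_horario ucs alunos) := by unfold Pre_horario; infer_instance

def pvWitness_horario : (List (String × List Int)) × (List (String × List String)) :=
  ([("alg", [1, 9, 2]), ("poo", [1, 10, 2])], [("ana", ["alg"]), ("rui", ["alg", "poo"])])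

def Spec_horario (ucs : List (String × List Int)) (alunos : List (String × List String)) (out : List (String × Int)) : Prop := out = horario_alt ucs alunos
instance (ucs : List (String × List Int)) (alunos : List (String × List String)) (out : List (String × Int)) : Decidable (Spec_horario ucs alunos out) := by unfold Spec_horario; infer_instance

-- ===== CLAIM (what is proved, stated in full; the proofs are below) =====
def Claim_equal_horario : Prop := ∀ (ucs : List (String × List Int)) (alunos : List (String × List String)), Dom_horario ucs alunos → Pre_horario ucs alunos → Spec_horario ucs alunos (horario ucs alunos)

-- ===== LEMMAS AND PROOFS =====

theorem pv_foldl_zero_if {α : Type} (l : List α) (p : α → Bool) (a : Int) :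
    l.foldl (fun f x => if p x then 0 else f) a = if l.any p then 0 else a := by
  induction l generalizing a with
  | nil => simp
  | cons x t ih =>
    simp only [List.foldl_cons, List.any_cons]
    by_cases h : p x <;> simp [h, ih]

theorem pv_foldl_zero_unless {α : Type} (l : List α) (p : α → Bool) (a : Int) :
    l.foldl (fun f x => if p x then f else 0) a = if l.all p then a else 0 := by
  induction l generalizing a with
  | nil => simp
  | cons x t ih =>
    simp only [List.foldl_cons, List.all_cons]
    by_cases h : p x <;> simp [h, ih]

def pvSobre (ucs : List (String × List Int)) : List (String × String) :=
  ucs.flatMap (fun p1 => (ucs.filter (fun p2 => decide (p1.1 ≠ p2.1) && pvFlagDay p1.2 p2.2)).map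
    (fun p2 => (p1.1, p2.1)))

theorem pv_allp_eq (v : List String) (acc : List (String × String)) :
    v.foldl (fun a uc1 => v.foldl (fun a uc2 => a ++ [(uc1, uc2)]) a) acc
      = acc ++ v.flatMap (fun a => v.map (fun b => (a, b))) := by
  rw [PySem.List.foldl_congr_mem _ _
        (fun (a : List (String × String)) uc1 => a ++ v.map (fun b => (uc1, b))) _
        (fun a uc1 _ => PySem.List.foldl_append_singleton_eq_map (fun b => (uc1, b)) v a)]
  exact PySem.List.foldl_append_eq_flatMap _ _ _

theorem pv_sobre_eq (ucs : List (String × List Int)) :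
    (ucs.foldl (fun acc p1 =>
      ucs.foldl (fun acc p2 =>
        if p1.1 ≠ p2.1 then
          (if pvFlagDay p1.2 p2.2 then acc ++ [(p1.1, p2.1)] else acc)
        else acc) acc) [])
    = pvSobre ucs := by
  unfold pvSobre
  rw [PySem.List.foldl_congr_mem _ _
        (fun (acc : List (String × String)) p1 =>
          acc ++ (ucs.filter (fun p2 => decide (p1.1 ≠ p2.1) && pvFlagDay p1.2 p2.2)).map (fun p2 => (p1.1, p2.1))) _
        (fun acc p1 _ => by
          rw [PySem.List.foldl_congr_mem _ _
                (fun (acc : List (String × String)) p2 =>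
                  if (decide (p1.1 ≠ p2.1) && pvFlagDay p1.2 p2.2) then acc ++ [(p1.1, p2.1)] else acc) _
                (fun acc p2 _ => by by_cases h : p1.1 = p2.1 <;> simp [h])]
          exact PySem.List.foldl_append_if _ _ _ _)]
  exact PySem.List.foldl_append_eq_flatMap _ _ _

theorem pv_lookup_cons (q : String × List Int) (t : List (String × List Int)) (uc : String) :
    pvLookup (q :: t) uc = if q.1 = uc then q.2 else pvLookup t uc := by
  simp only [pvLookup, List.find?_cons]
  by_cases h : q.1 = uc
  · simp [h]
  · rw [show (q.1 == uc) = false from beq_eq_false_iff_ne.mpr h]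
    simp [h]

theorem pv_contains_map (ucs : List (String × List Int)) (uc : String) :
    (ucs.map Prod.fst).contains uc = ucs.any (fun q => q.1 == uc) := by
  induction ucs with
  | nil => rfl
  | cons p t ih =>
    simp only [List.map_cons, List.contains_cons, List.any_cons, ← ih]
    by_cases h : p.1 = uc
    · simp [h]
    · rw [beq_eq_false_iff_ne.mpr (fun hh => h hh.symm), beq_eq_false_iff_ne.mpr h]

theorem pv_lookup_of_mem (ucs : List (String × List Int)) (p : String × List Int)
    (hU : (ucs.map Prod.fst).Nodup) (h : p ∈ ucs) : pvLookup ucs p.1 = p.2 := by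
  induction ucs with
  | nil => simp at h
  | cons q t ih =>
    simp only [List.map_cons, List.nodup_cons] at hU
    rw [pv_lookup_cons]
    rcases List.mem_cons.mp h with rfl | hmem
    · simp
    · have hne : q.1 ≠ p.1 := fun he => hU.1 (he ▸ List.mem_map_of_mem hmem)
      rw [if_neg hne]
      exact ih hU.2 hmem

theorem pv_mem_of_any (ucs : List (String × List Int)) (uc : String)
    (h : ucs.any (fun q => q.1 == uc) = true) : (uc, pvLookup ucs uc) ∈ ucs := by
  induction ucs with
  | nil => simp at h
  | cons q t ih =>
    rw [pv_lookup_cons]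
    by_cases he : q.1 = uc
    · subst he; simp
    · rw [if_neg he]
      simp only [List.any_cons, Bool.or_eq_true] at h
      exact List.mem_cons_of_mem _ (ih (h.resolve_left (by simp [he])))

theorem pv_filter_key (ucs : List (String × List Int)) (uc : String)
    (hU : (ucs.map Prod.fst).Nodup) (h : ucs.any (fun q => q.1 == uc) = true) :
    ucs.filter (fun q => decide (uc = q.1)) = [(uc, pvLookup ucs uc)] := by
  induction ucs with
  | nil => simp at h
  | cons q t ih =>
    simp only [List.map_cons, List.nodup_cons] at hU
    rw [pv_lookup_cons]
    by_cases he : q.1 = uc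
    · subst he
      have hrest : t.filter (fun r => decide (q.1 = r.1)) = [] := by
        rw [List.filter_eq_nil_iff]
        intro r hr hd
        have hqr : q.1 = r.1 := by simpa using hd
        exact hU.1 (by rw [hqr]; exact List.mem_map_of_mem hr)
      simp [hrest]
    · simp only [List.any_cons, Bool.or_eq_true] at h
      rw [if_neg he]
      simp only [List.filter_cons, show decide (uc = q.1) = false by simp; exact fun hh => he hh.symm]
      exact ih hU.2 (h.resolve_left (by simp [he]))

theorem pv_conflict_eq (ucs : List (String × List Int)) (a b : String) :
    pvConflict ucs a b = pvFlagDay (pvLookup ucs a) (pvLookup ucs b) := by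
  dsimp only [pvConflict, pvFlagDay]
  split_ifs <;> (simp_all; try omega)

theorem pv_mem_sobre (ucs : List (String × List Int)) (hU : (ucs.map Prod.fst).Nodup) (a b : String) :
    (a, b) ∈ pvSobre ucs ↔
      (ucs.any (fun q => q.1 == a) = true ∧ ucs.any (fun q => q.1 == b) = true ∧ a ≠ b ∧
        pvFlagDay (pvLookup ucs a) (pvLookup ucs b) = true) := by
  simp only [pvSobre, List.mem_flatMap, List.mem_map, List.mem_filter, Bool.and_eq_true,
    decide_eq_true_eq]
  constructor
  · rintro ⟨p1, hp1, p2, ⟨hp2, hne, hfd⟩, heq⟩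
    obtain ⟨h1, h2⟩ := Prod.mk.injEq .. ▸ heq
    subst h1; subst h2
    exact ⟨List.any_eq_true.mpr ⟨p1, hp1, by simp⟩, List.any_eq_true.mpr ⟨p2, hp2, by simp⟩,
      hne, by rw [pv_lookup_of_mem ucs p1 hU hp1, pv_lookup_of_mem ucs p2 hU hp2]; exact hfd⟩
  · rintro ⟨ha, hb, hne, hfd⟩
    exact ⟨(a, pvLookup ucs a), pv_mem_of_any ucs a ha, (b, pvLookup ucs b),
      ⟨pv_mem_of_any ucs b hb, hne, hfd⟩, rfl⟩

theorem pv_step (ucs : List (String × List Int)) (hU : (ucs.map Prod.fst).Nodup)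
    (res : List (String × Int)) (p : String × List String) :
    (let all_possibles_ucs := p.2.foldl (fun a uc1 => p.2.foldl (fun a uc2 => a ++ [(uc1, uc2)]) a) []
     let flag1 : Int := all_possibles_ucs.foldl (fun f uc => if (pvSobre ucs).contains uc then 0 else f) 1
     if flag1 ≠ 0 then
       let s := p.2.foldl (fun s uc1 =>
           (ucs.foldl (fun h q => if uc1 = q.1 then h + pvG q.2 2 else h) s.1,
            if (ucs.map Prod.fst).contains uc1 then s.2 else (0 : Int))) ((0 : Int), (1 : Int))
       if s.2 ≠ 0 then res ++ [(p.1, s.1)] else res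
     else res)
    = (if p.2.any (fun uc => !(ucs.any (fun q => q.1 == uc))) then res
       else if p.2.any (fun a => p.2.any (fun b => a ≠ b ∧ pvConflict ucs a b)) then res
       else res ++ [(p.1, (p.2.map (fun uc => pvG (pvLookup ucs uc) 2)).sum)]) := by
  dsimp only
  rw [pv_allp_eq, List.nil_append, pv_foldl_zero_if,
      PySem.List.foldl_prod_mk
        (f := fun h uc1 => ucs.foldl (fun h q => if uc1 = q.1 then h + pvG q.2 2 else h) h)
        (g := fun f uc1 => if (ucs.map Prod.fst).contains uc1 then f else (0 : Int)),
      pv_foldl_zero_unless]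
  by_cases hmiss : (p.2.any (fun uc => !(ucs.any (fun q => q.1 == uc)))) = true
  · -- some UC missing: both sides return res
    rw [if_pos hmiss]
    have hall : (p.2.all ((ucs.map Prod.fst).contains)) = false := by
      rw [List.all_eq_not_any_not, Bool.not_eq_false']
      refine List.any_eq_true.mpr ?_
      obtain ⟨uc, huc, hnc⟩ := List.any_eq_true.mp hmiss
      exact ⟨uc, huc, by rw [pv_contains_map]; simpa using hnc⟩
    rw [hall]
    split_ifs <;> first | rfl | simp_all
  · -- every UC present
    have hall : ∀ uc ∈ p.2, ucs.any (fun q => q.1 == uc) = true := by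
      intro uc huc
      by_contra hnc
      exact hmiss (List.any_eq_true.mpr ⟨uc, huc, by
        rw [Bool.not_eq_true']; exact Bool.eq_false_iff.mpr hnc⟩)
    rw [if_neg hmiss]
    have hallc : (p.2.all ((ucs.map Prod.fst).contains)) = true := by
      refine List.all_eq_true.mpr fun uc huc => ?_
      rw [pv_contains_map]; exact hall uc huc
    rw [hallc]
    -- the conflict tests agree
    have hconfl : ((p.2.flatMap (fun a => p.2.map (fun b => (a, b)))).any (fun uc => (pvSobre ucs).contains uc))
        = p.2.any (fun a => p.2.any (fun b => a ≠ b ∧ pvConflict ucs a b)) := by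
      cases hB : p.2.any (fun a => p.2.any (fun b => a ≠ b ∧ pvConflict ucs a b)) with
      | true =>
        obtain ⟨a, ha, hb⟩ := List.any_eq_true.mp hB
        obtain ⟨b, hbm, hab⟩ := List.any_eq_true.mp hb
        simp only [decide_eq_true_eq] at hab
        refine List.any_eq_true.mpr ⟨(a, b), ?_, ?_⟩
        · exact List.mem_flatMap.mpr ⟨a, ha, List.mem_map.mpr ⟨b, hbm, rfl⟩⟩
        · simp only [List.contains_iff_mem]
          exact (pv_mem_sobre ucs hU a b).mpr
            ⟨hall a ha, hall b hbm, hab.1, by rw [← pv_conflict_eq]; exact hab.2⟩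
      | false =>
        refine (Bool.eq_false_iff).mpr fun hA => ?_
        obtain ⟨pr, hpr, hc⟩ := List.any_eq_true.mp hA
        obtain ⟨a, ha, hmm⟩ := List.mem_flatMap.mp hpr
        obtain ⟨b, hbm, heq⟩ := List.mem_map.mp hmm
        subst heq
        simp only [List.contains_iff_mem] at hc
        obtain ⟨-, -, hab, hfd⟩ := (pv_mem_sobre ucs hU a b).mp hc
        exact (Bool.eq_false_iff.mp hB) (List.any_eq_true.mpr ⟨a, ha, List.any_eq_true.mpr ⟨b, hbm,
          by simp only [decide_eq_true_eq]; exact ⟨hab, by rw [pv_conflict_eq]; exact hfd⟩⟩⟩)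
    cases hC : p.2.any (fun a => p.2.any (fun b => a ≠ b ∧ pvConflict ucs a b)) with
    | true => rw [hC] at hconfl; simp [hconfl]
    | false =>
      rw [hC] at hconfl
      rw [hconfl]
      have hhours : p.2.foldl (fun h uc1 => ucs.foldl (fun h q => if uc1 = q.1 then h + pvG q.2 2 else h) h) 0
          = (p.2.map (fun uc => pvG (pvLookup ucs uc) 2)).sum := by
        rw [PySem.List.foldl_congr_mem _ _ (fun h uc1 => h + pvG (pvLookup ucs uc1) 2) _
              (fun h uc1 hm => by
                rw [PySem.List.foldl_ite_eq_foldl_filter (p := fun q => uc1 = q.1)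
                      (f := fun h q => h + pvG q.2 2) (l := ucs) (init := h)]
                rw [pv_filter_key ucs uc1 hU (hall uc1 hm)]
                simp)]
        rw [PySem.List.foldl_add]
        simp
      simp [hhours]

theorem pv_horario_eq (ucs : List (String × List Int)) (alunos : List (String × List String))
    (hU : (ucs.map Prod.fst).Nodup) : horario ucs alunos = horario_alt ucs alunos := by
  unfold horario horario_alt
  dsimp only
  rw [pv_sobre_eq]
  congr 1
  exact PySem.List.foldl_congr_mem _ _ _ _ (fun res p _ => pv_step ucs hU res p)

-- ===== VERDICT (by name: the statement is the Claim_ definition above) =====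
theorem horario_spec : Claim_equal_horario := by
  intro ucs alunos _hDom hPre
  exact pv_horario_eq ucs alunos hPre.1
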